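-- pv_equiv track=rewrite | github.com/ttrunck/CodePuzzle | Rosalind/AC/rosalind.py | rna_reverse_complement
-- ===== SOURCE A (Python) =====
-- def rna_reverse_complement(s):
--     '''
--     Given a RNA string return its reversed complement
--     '''
--     s=s.replace('A','u')
--     s=s.replace('U','a')
--     s=s.replace('C','g')
--     s=s.replace('G','c')
--     res=''
--     for i in reversed(s.upper()):
--         res+=i
--     return res
-- ===== SOURCE B (Python) =====
-- def rna_reverse_complement(s):
--     '''
--     Given a RNA string return its reversed complement
--     '''
--     comp = {'A': 'U', 'U': 'A', 'C': 'G', 'G': 'C'}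
--     return ''.join(comp.get(c, c.upper()) for c in reversed(s))
-- ===== Notes on version B (the rewrite author's own statement) =====
-- stated objective: simpler
-- what changed: Replaces A's four sequential replace() passes plus an explicit reversed-append loop by a single one-pass join over reversed(s) with a complement table and an uppercase fallback.
import Mathlib
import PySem

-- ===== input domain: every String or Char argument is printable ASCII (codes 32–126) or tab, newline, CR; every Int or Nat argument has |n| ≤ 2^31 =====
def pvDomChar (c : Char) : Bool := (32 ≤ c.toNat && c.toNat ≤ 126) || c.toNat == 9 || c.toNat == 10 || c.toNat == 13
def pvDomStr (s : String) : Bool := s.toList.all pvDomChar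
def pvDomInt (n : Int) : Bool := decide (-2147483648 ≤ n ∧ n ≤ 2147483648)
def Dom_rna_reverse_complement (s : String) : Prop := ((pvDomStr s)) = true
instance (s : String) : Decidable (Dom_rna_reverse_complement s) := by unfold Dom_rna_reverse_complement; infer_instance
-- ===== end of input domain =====

-- B replaces A's four sequential replace() passes and the reversed-append loop by one
-- table-lookup pass over reversed(s); objective: simpler (same O(n) cost).

-- ===== PORT A =====
def rna_reverse_complement (s : String) : String :=
  let s1 := PySem.Str.replace s "A" "u"
  let s2 := PySem.Str.replace s1 "U" "a"
  let s3 := PySem.Str.replace s2 "C" "g"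
  let s4 := PySem.Str.replace s3 "G" "c"
  (PySem.Str.upper s4).toList.reverse.foldl (fun res c => res.push c) ""

-- ===== PORT B =====
def rnaComp : PySem.Dict Char Char :=
  PySem.Dict.ofList [('A', 'U'), ('U', 'A'), ('C', 'G'), ('G', 'C')]

def rna_reverse_complement_alt (s : String) : String :=
  PySem.Str.join ""
    (s.toList.reverse.map (fun c => String.singleton (rnaComp.getD c (PySem.Chars.upperChar c))))

-- ===== PRECONDITION & SPEC =====
def Spec_rna_reverse_complement (s : String) (out : String) : Prop := out = rna_reverse_complement_alt s
instance (s : String) (out : String) : Decidable (Spec_rna_reverse_complement s out) := by unfold Spec_rna_reverse_complement; infer_instance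

-- ===== CLAIM (what is proved, stated in full; the proofs are below) =====
def Claim_equal_rna_reverse_complement : Prop := ∀ (s : String), Dom_rna_reverse_complement s → Spec_rna_reverse_complement s (rna_reverse_complement s)

-- ===== LEMMAS AND PROOFS =====

-- replace with a single-character pattern is a per-character map
theorem replace_go_singleton (a b : Char) :
    ∀ (l : List Char) (fuel : Nat) (acc : List Char), l.length ≤ fuel →
      PySem.Chars.replace.go [a] [b] fuel l acc
        = acc.reverse ++ l.map (fun c => if c = a then b else c) := by
  intro l
  induction l with
  | nil =>
      intro fuel acc _
      cases fuel <;> simp [PySem.Chars.replace.go]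
  | cons c t ih =>
      intro fuel acc h
      cases fuel with
      | zero => simp at h
      | succ n =>
          by_cases hc : c = a
          · subst hc
            rw [show PySem.Chars.replace.go [c] [b] (n+1) (c :: t) acc
                  = PySem.Chars.replace.go [c] [b] n t ([b].reverse ++ acc) by
                  simp [PySem.Chars.replace.go, List.isPrefixOf]]
            rw [ih n ([b].reverse ++ acc) (by simpa using h)]
            simp
          · rw [show PySem.Chars.replace.go [a] [b] (n+1) (c :: t) acc
                  = PySem.Chars.replace.go [a] [b] n t (c :: acc) by
                  simp [PySem.Chars.replace.go, List.isPrefixOf,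
                        show (a == c) = false by simp; exact fun h => hc h.symm]]
            rw [ih n (c :: acc) (by simpa using h)]
            simp [hc]

theorem replace_singleton (a b : Char) (l : List Char) :
    PySem.Chars.replace l [a] [b] = l.map (fun c => if c = a then b else c) := by
  rw [PySem.Chars.replace]
  simp [replace_go_singleton a b l l.length [] le_rfl]

-- the table lookup of B, written as an if-chain
theorem rnaComp_getD (c d : Char) :
    rnaComp.getD c d
      = if c = 'A' then 'U' else if c = 'U' then 'A' else
        if c = 'C' then 'G' else if c = 'G' then 'C' else d := by
  have hmk : rnaComp = PySem.Dict.mk [('A', 'U'), ('U', 'A'), ('C', 'G'), ('G', 'C')] := by decide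
  rw [hmk, PySem.Dict.getD]
  simp only [PySem.Dict.get?_mk_cons]
  have : ∀ a : Char, (a == c) = decide (c = a) := by
    intro a; by_cases h : c = a <;> simp [h] <;> exact fun hh => h hh.symm
  simp only [this]
  by_cases h1 : c = 'A' <;> by_cases h2 : c = 'U' <;> by_cases h3 : c = 'C' <;>
    by_cases h4 : c = 'G' <;>
    simp [h1, h2, h3, h4, PySem.Dict.get?]

-- A's four replaces followed by upper agree, per character, with B's lookup
theorem chain_eq_lookup (c : Char) :
    PySem.Chars.upperChar
      ((fun c => if c = 'G' then 'c' else c)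
        ((fun c => if c = 'C' then 'g' else c)
          ((fun c => if c = 'U' then 'a' else c)
            ((fun c => if c = 'A' then 'u' else c) c))))
      = rnaComp.getD c (PySem.Chars.upperChar c) := by
  rw [rnaComp_getD]
  by_cases h1 : c = 'A'
  · subst h1; decide
  by_cases h2 : c = 'U'
  · subst h2; decide
  by_cases h3 : c = 'C'
  · subst h3; decide
  by_cases h4 : c = 'G'
  · subst h4; decide
  simp [h1, h2, h3, h4]

-- A's append loop builds the string from the character list
theorem foldl_push_eq (l : List Char) :
    ∀ acc : String, (l.foldl (fun res c => res.push c) acc).toList = acc.toList ++ l := by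
  induction l with
  | nil => intro acc; simp
  | cons c t ih => intro acc; simp [ih]

-- ===== VERDICT (by name: the statement is the Claim_ definition above) =====
theorem rna_reverse_complement_spec : Claim_equal_rna_reverse_complement := by
  intro s _
  unfold Spec_rna_reverse_complement rna_reverse_complement rna_reverse_complement_alt
  apply String.toList_inj.mp
  rw [foldl_push_eq]
  rw [show (PySem.Str.join ""
      (s.toList.reverse.map (fun c => String.singleton (rnaComp.getD c (PySem.Chars.upperChar c))))).toList
    = s.toList.reverse.map (fun c => rnaComp.getD c (PySem.Chars.upperChar c)) by
      rw [PySem.Str.toList_join]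
      have := PySem.Chars.join_nil_singletons
        (s.toList.reverse.map (fun c => rnaComp.getD c (PySem.Chars.upperChar c)))
      simpa [Function.comp_def] using this]
  simp only [PySem.Str.toList_upper, PySem.Str.toList_replace]
  simp only [show ("A" : String).toList = ['A'] from rfl, show ("u" : String).toList = ['u'] from rfl,
             show ("U" : String).toList = ['U'] from rfl, show ("a" : String).toList = ['a'] from rfl,
             show ("C" : String).toList = ['C'] from rfl, show ("g" : String).toList = ['g'] from rfl,
             show ("G" : String).toList = ['G'] from rfl, show ("c" : String).toList = ['c'] from rfl]
  simp only [replace_singleton, PySem.Chars.upper, List.map_map, List.map_reverse]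
  simp [Function.comp, chain_eq_lookup]
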